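-- pv_equiv track=rewrite | github.com/thalyssonDEV/Algoritmo-e--Programacao | Pense em Python/jogos_de_palavras.py | option_6
-- ===== SOURCE A (Python) =====
-- def remove_space(word):
--
--     new_word = ''
--     for character in word:
--         if character != ' ':
--             new_word += character
--     return new_word
--
-- def option_6(fin):
--     results = []
--     count_words_alphabetical = 0
--
--     for line in fin:
--         words = line.strip().split()
--
--         for word in words:
--             formatted_word = remove_space(word)
--             is_alphabetical = True
--
--             for i in range(len(formatted_word) - 1):
--                 if formatted_word[i] > formatted_word[i + 1]:
--                     is_alphabetical = False
--                     break
--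
--             if is_alphabetical:
--                 results.append(formatted_word)
--                 count_words_alphabetical += 1
--
--     return results, count_words_alphabetical
-- ===== SOURCE B (Python) =====
-- def option_6(fin):
--     results = [w for line in fin
--                  for w in line.strip().split()
--                  if w == ''.join(sorted(w))]
--     return results, len(results)
-- ===== Notes on version B (the rewrite author's own statement) =====
-- stated objective: simpler
-- what changed: Replaces A's quadruple nested loop (per line, per word, a char-by-char space-removal pass and an early-breaking pairwise index scan) with a single comprehension keeping each word that equals its characters in sorted order; the redundant remove_space pass disappears since split() tokens contain no whitespace.
import Mathlib
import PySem

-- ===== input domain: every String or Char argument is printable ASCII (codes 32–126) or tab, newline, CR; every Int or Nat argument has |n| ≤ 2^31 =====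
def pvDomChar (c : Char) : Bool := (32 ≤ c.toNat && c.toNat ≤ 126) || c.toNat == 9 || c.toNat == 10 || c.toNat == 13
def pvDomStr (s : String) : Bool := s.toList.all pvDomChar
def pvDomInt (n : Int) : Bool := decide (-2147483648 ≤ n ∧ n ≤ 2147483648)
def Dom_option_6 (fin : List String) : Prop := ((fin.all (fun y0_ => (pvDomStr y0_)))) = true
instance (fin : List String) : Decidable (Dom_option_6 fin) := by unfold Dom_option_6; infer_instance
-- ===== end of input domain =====

-- B replaces A's quadruple loop (per-line, per-word, a space-removal pass and an
-- early-breaking pairwise index scan) by one comprehension keeping each word equal to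
-- its sorted characters; objective: simpler.


-- ===== PORT A =====
-- remove_space: build new_word character by character, skipping ' '
def removeSpace (word : String) : String :=
  String.ofList (word.toList.foldl (fun acc c => if c != ' ' then acc ++ [c] else acc) [])

-- the early-breaking loop 'for i in range(len(w)-1): if w[i] > w[i+1]: is_alphabetical=False; break'
-- as the obvious recursion over successive adjacent pairs
def isAlphaScan : List Char → Bool
  | a :: b :: rest => if a > b then false else isAlphaScan (b :: rest)
  | _ => true

def option_6 (fin : List String) : List String × Int :=
  fin.foldl (fun st line =>
      (PySem.Str.split₀ (PySem.Str.strip line)).foldl (fun st word =>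
          let fw := removeSpace word
          if isAlphaScan fw.toList then (st.1 ++ [fw], st.2 + 1) else st)
        st)
    ([], 0)

-- ===== PORT B =====
-- w == ''.join(sorted(w)) is compared on the character lists (exact: join of the
-- sorted characters has exactly those characters)
def option_6_alt (fin : List String) : List String × Int :=
  let results := fin.flatMap (fun line =>
    (PySem.Str.split₀ (PySem.Str.strip line)).filter
      (fun w => w.toList == PySem.List.sorted w.toList (fun c => c)))
  (results, (results.length : Int))

-- ===== PRECONDITION & SPEC =====
def Spec_option_6 (fin : List String) (out : List String × Int) : Prop := out = option_6_alt fin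
instance (fin : List String) (out : List String × Int) : Decidable (Spec_option_6 fin out) := by unfold Spec_option_6; infer_instance

-- ===== CLAIM (what is proved, stated in full; the proofs are below) =====
def Claim_equal_option_6 : Prop := ∀ (fin : List String), Dom_option_6 fin → Spec_option_6 fin (option_6 fin)

-- ===== LEMMAS AND PROOFS =====

-- every word produced by split() is free of whitespace characters
theorem split₀_go_nospace (s : List Char) : ∀ (cur : List Char) (acc : List (List Char)),
    (∀ c ∈ cur, PySem.Chars.isspace c = false) →
    (∀ w ∈ acc, ∀ c ∈ w, PySem.Chars.isspace c = false) →
    ∀ w ∈ PySem.Chars.split₀.go s cur acc, ∀ c ∈ w, PySem.Chars.isspace c = false := by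
  induction s with
  | nil =>
    intro cur acc hcur hacc w hw
    simp only [PySem.Chars.split₀.go] at hw
    split at hw
    · exact hacc w (by simpa using hw)
    · have hw' : w ∈ acc ∨ w = cur.reverse := by simpa using hw
      rcases hw' with h | h
      · exact hacc w h
      · subst h; intro c hc; exact hcur c (by simpa using hc)
  | cons a rest ih =>
    intro cur acc hcur hacc w hw
    simp only [PySem.Chars.split₀.go] at hw
    by_cases hs : PySem.Chars.isspace a = true
    · rw [if_pos hs] at hw
      split at hw
      · exact ih [] acc (by simp) hacc w hw
      · refine ih [] (cur.reverse :: acc) (by simp) ?_ w hw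
        intro v hv
        rcases List.mem_cons.mp hv with h | h
        · subst h; intro c hc; exact hcur c (by simpa using hc)
        · exact hacc v h
    · rw [if_neg hs] at hw
      refine ih (a :: cur) acc ?_ hacc w hw
      intro c hc
      rcases List.mem_cons.mp hc with h | h
      · subst h; simpa using hs
      · exact hcur c h
 
theorem split₀_nospace (s : String) :
    ∀ w ∈ PySem.Str.split₀ s, ∀ c ∈ w.toList, PySem.Chars.isspace c = false := by
  intro w hw
  simp only [PySem.Str.split₀, List.mem_map] at hw
  obtain ⟨ws, hws, rfl⟩ := hw
  simpa using
    split₀_go_nospace s.toList [] [] (by simp) (by simp) ws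
      (by simpa [PySem.Chars.split₀] using hws)

theorem removeSpace_eq_self (w : String)
    (h : ∀ c ∈ w.toList, PySem.Chars.isspace c = false) : removeSpace w = w := by
  unfold removeSpace
  have hfold := PySem.List.foldl_append_if (fun c => c != ' ') id w.toList []
  simp only [List.map_id_fun, id] at hfold
  rw [hfold]
  have hf : w.toList.filter (fun c => c != ' ') = w.toList := by
    apply List.filter_eq_self.mpr
    intro c hc
    have := h c hc
    simp only [bne_iff_ne, ne_eq]
    intro hce
    rw [hce] at this
    simp [PySem.Chars.isspace] at this
  simp [hf, String.ofList_toList]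

theorem isAlphaScan_chain (cs : List Char) :
    isAlphaScan cs = true ↔ List.IsChain (· ≤ ·) cs := by
  induction cs with
  | nil => simp [isAlphaScan]
  | cons a t ih =>
    cases t with
    | nil => simp [isAlphaScan]
    | cons b r =>
      by_cases hab : a > b
      · simp [isAlphaScan, hab, List.isChain_cons_cons, not_le_of_gt hab]
      · simp only [isAlphaScan, if_neg hab]
        rw [ih, List.isChain_cons_cons]
        have : a ≤ b := le_of_not_gt hab
        tauto

theorem isAlphaScan_eq_sorted (cs : List Char) :
    isAlphaScan cs = (cs == PySem.List.sorted cs (fun c => c)) := by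
  by_cases h : isAlphaScan cs = true
  · have hp : List.Pairwise (· ≤ ·) cs :=
      ((isAlphaScan_chain cs).mp h).pairwise
    rw [h, PySem.List.sorted_eq_self_of_pairwise cs (fun c => c) hp]
    simp
  · have hb : isAlphaScan cs = false := by simpa using h
    rw [hb]
    by_contra hc
    have hceq : cs = PySem.List.sorted cs (fun c => c) := by
      by_contra hne
      simp [beq_eq_false_iff_ne, hne] at hc
    have hp : List.Pairwise (· ≤ ·) cs := by
      have := PySem.List.sorted_pairwise cs (fun c => c)
      rw [← hceq] at this
      exact this
    exact h ((isAlphaScan_chain cs).mpr hp.isChain)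

-- the per-line inner word loop
theorem inner_fold (words : List String) :
    ∀ (res : List String) (cnt : Int),
    (∀ w ∈ words, ∀ c ∈ w.toList, PySem.Chars.isspace c = false) →
    words.foldl (fun st word =>
        let fw := removeSpace word
        if isAlphaScan fw.toList then (st.1 ++ [fw], st.2 + 1) else st) (res, cnt)
      = (res ++ words.filter (fun w => w.toList == PySem.List.sorted w.toList (fun c => c)),
         cnt + ((words.filter (fun w => w.toList == PySem.List.sorted w.toList (fun c => c))).length : Int)) := by
  induction words with
  | nil => intro res cnt _; simp
  | cons w t ih =>
    intro res cnt h
    have hw := removeSpace_eq_self w (h w (by simp))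
    have ht : ∀ v ∈ t, ∀ c ∈ v.toList, PySem.Chars.isspace c = false := by
      intro v hv; exact h v (List.mem_cons_of_mem _ hv)
    rw [List.foldl_cons]
    rw [show (let fw := removeSpace w;
          if isAlphaScan fw.toList = true then ((res, cnt).1 ++ [fw], (res, cnt).2 + 1)
          else (res, cnt))
        = if (w.toList == PySem.List.sorted w.toList (fun c => c)) = true
            then (res ++ [w], cnt + 1) else (res, cnt) from by
      simp only [hw, isAlphaScan_eq_sorted]]
    by_cases hp : (w.toList == PySem.List.sorted w.toList (fun c => c)) = true
    · rw [if_pos hp, ih (res ++ [w]) (cnt + 1) ht]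
      simp only [List.filter_cons, hp, if_pos, Prod.mk.injEq, List.append_assoc,
        List.singleton_append, List.length_cons, true_and]
      push_cast; ring
    · have hp' : (w.toList == PySem.List.sorted w.toList (fun c => c)) = false := by
        simpa using hp
      rw [hp', if_neg (by simp), ih res cnt ht]
      simp [hp']

-- the outer line loop equals B's flatMap, with the count tracking the length
theorem outer_fold (fin : List String) :
    ∀ (res : List String) (cnt : Int),
    fin.foldl (fun st line =>
        (PySem.Str.split₀ (PySem.Str.strip line)).foldl (fun st word =>
            let fw := removeSpace word
            if isAlphaScan fw.toList then (st.1 ++ [fw], st.2 + 1) else st) st) (res, cnt)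
      = (res ++ fin.flatMap (fun line =>
            (PySem.Str.split₀ (PySem.Str.strip line)).filter
              (fun w => w.toList == PySem.List.sorted w.toList (fun c => c))),
         cnt + ((fin.flatMap (fun line =>
            (PySem.Str.split₀ (PySem.Str.strip line)).filter
              (fun w => w.toList == PySem.List.sorted w.toList (fun c => c)))).length : Int)) := by
  induction fin with
  | nil => intro res cnt; simp
  | cons line rest ih =>
    intro res cnt
    simp only [List.foldl_cons]
    rw [inner_fold _ res cnt (split₀_nospace _), ih]
    simp only [List.flatMap_cons, List.append_assoc, List.length_append, Prod.mk.injEq, true_and]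
    push_cast; ring

-- ===== VERDICT (by name: the statement is the Claim_ definition above) =====
theorem option_6_spec : Claim_equal_option_6 := by
  intro fin _
  unfold Spec_option_6 option_6 option_6_alt
  rw [outer_fold fin [] 0]
  simp
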